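-- pv_equiv track=rewrite | github.com/superadm1n/CiscoAutomationFramework | CiscoAutomationFramework/Parsers/RoutingTableParser.py | _parse_out_header_nexus
-- ===== SOURCE A (Python) =====
-- def _parse_out_header_nexus(data):
--     return_data = []
--     flag = False
--     for line in data:
--         if line == '':
--             flag = True
--             continue
--         if flag is True:
--             return_data.append(line)
--
--     return return_data
-- ===== SOURCE B (Python) =====
-- def _parse_out_header_nexus(data):
--     try:
--         i = data.index('')
--     except ValueError:
--         return []
--     return [line for line in data[i+1:] if line != '']
-- ===== Notes on version B (the rewrite author's own statement) =====
-- stated objective: simpler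
-- what changed: Replaces the latching-flag single pass with find-the-first-empty-line (list.index) then a filtering comprehension over the suffix.
import Mathlib
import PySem

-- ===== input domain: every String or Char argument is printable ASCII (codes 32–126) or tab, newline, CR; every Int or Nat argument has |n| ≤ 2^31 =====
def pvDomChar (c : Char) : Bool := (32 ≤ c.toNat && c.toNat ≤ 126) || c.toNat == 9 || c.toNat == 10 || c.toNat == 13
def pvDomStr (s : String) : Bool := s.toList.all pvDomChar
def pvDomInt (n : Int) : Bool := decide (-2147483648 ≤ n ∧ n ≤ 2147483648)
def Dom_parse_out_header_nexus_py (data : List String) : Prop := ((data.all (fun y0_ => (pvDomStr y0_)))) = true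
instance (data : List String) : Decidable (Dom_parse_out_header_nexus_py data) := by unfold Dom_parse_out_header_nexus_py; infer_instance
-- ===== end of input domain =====

-- ===== PORT A =====
-- literal port of A: single pass with a latching flag (return_data, flag)
def parse_out_header_nexus_py (data : List String) : List String :=
  (data.foldl (fun (st : List String × Bool) line =>
    if line = "" then (st.1, true)
    else if st.2 = true then (st.1 ++ [line], st.2)
    else st) ([], false)).1

-- ===== PORT B =====
-- port of B: index of the first '' (ValueError -> []), then filter the slice data[i+1:]
def parse_out_header_nexus_py_alt (data : List String) : List String :=
  match PySem.List.index? data "" with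
  | none => []
  | some i => (PySem.List.slice data (some ((i : Int) + 1)) none).filter (fun line => line ≠ "")

-- ===== PRECONDITION & SPEC =====
def Spec_parse_out_header_nexus_py (data : List String) (out : List String) : Prop := out = parse_out_header_nexus_py_alt data
instance (data : List String) (out : List String) : Decidable (Spec_parse_out_header_nexus_py data out) := by unfold Spec_parse_out_header_nexus_py; infer_instance

-- ===== CLAIM =====
def Claim_equal_parse_out_header_nexus_py : Prop := ∀ (data : List String), Dom_parse_out_header_nexus_py data → Spec_parse_out_header_nexus_py data (parse_out_header_nexus_py data)

-- ===== LEMMAS AND PROOFS =====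
theorem alt_eq_drop (data : List String) :
    parse_out_header_nexus_py_alt data = match List.idxOf? "" data with
      | none => []
      | some i => (data.drop (i+1)).filter (fun line => line ≠ "") := by
  unfold parse_out_header_nexus_py_alt
  rw [PySem.List.index?_eq_idxOf?]
  cases h : List.idxOf? "" data with
  | none => rfl
  | some i =>
    simp only
    rw [show ((i:Int)+1) = (((i+1 : Nat)):Int) by push_cast; ring, PySem.List.slice_from_natCast]

theorem fold_true (rest : List String) (acc : List String) :
    (rest.foldl (fun (st : List String × Bool) line =>
      if line = "" then (st.1, true)
      else if st.2 = true then (st.1 ++ [line], st.2)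
      else st) (acc, true)).1 = acc ++ rest.filter (fun line => line ≠ "") := by
  induction rest generalizing acc with
  | nil => simp
  | cons x xs ih =>
    by_cases hx : x = ""
    · simp [hx, ih]
    · simp [hx, ih]

theorem pv_main (data : List String) : parse_out_header_nexus_py data = parse_out_header_nexus_py_alt data := by
  rw [alt_eq_drop]
  induction data with
  | nil => rfl
  | cons x xs ih =>
    by_cases hx : x = ""
    · subst hx
      have h0 : List.idxOf? "" ("" :: xs) = some 0 := by rw [← PySem.List.index?_eq_idxOf?, PySem.List.index?_cons_self]
      rw [h0]
      simp only [parse_out_header_nexus_py, List.foldl_cons]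
      have := fold_true xs []
      simpa using this
    · have h1 : List.idxOf? "" (x :: xs) = (List.idxOf? "" xs).map (· + 1) := by
        simp [List.idxOf?_cons, hx]
      rw [h1]
      simp only [parse_out_header_nexus_py, List.foldl_cons, if_neg hx]
      simp only [parse_out_header_nexus_py] at ih
      cases h : List.idxOf? "" xs with
      | none => rw [h] at ih; simpa using ih
      | some i =>
        rw [h] at ih
        simpa [hx] using ih

-- ===== VERDICT =====
theorem parse_out_header_nexus_py_spec : Claim_equal_parse_out_header_nexus_py := by
  intro data _
  unfold Spec_parse_out_header_nexus_py
  exact pv_main data
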